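-- pv_equiv track=rewrite | github.com/vaibhav-jain-dev/learning-algo | problems/200-must-solve/graphs/10-airport-connections/python_code.py | get_reachable_airports_in_set
-- ===== SOURCE A (Python) =====
-- from typing import List, Dict, Set
--
-- def get_reachable_airports_in_set(
--     graph: Dict[str, List[str]],
--     start: str,
--     valid_set: Set[str]
-- ) -> Set[str]:
--     """Get all airports reachable from start that are in valid_set."""
--     reachable: Set[str] = set()
--     stack = [start]
--
--     while stack:
--         airport = stack.pop()
--         if airport in reachable or airport not in valid_set:
--             continue
--         reachable.add(airport)
--         for neighbor in graph[airport]: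
--             if neighbor not in reachable and neighbor in valid_set:
--                 stack.append(neighbor)
--
--     return reachable
-- ===== SOURCE B (Python) =====
-- def get_reachable_airports_in_set(graph, start, valid_set):
--     """Get all airports reachable from start that are in valid_set.
--
--     Round-based closure instead of a per-node DFS stack: repeatedly relax the
--     whole current set by one edge step until it stops growing (at most
--     len(valid_set) rounds are ever needed, since each non-final round adds at
--     least one new valid airport). Airports without a graph entry are treated
--     as having no outgoing routes (graph.get), so B never raises KeyError."""
--     reachable = {start} if start in valid_set else set()
--     for _ in range(len(valid_set)):
--         nxt = reachable | {n for a in reachable for n in graph.get(a, ()) if n in valid_set}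
--         if nxt == reachable:
--             break
--         reachable = nxt
--     return reachable
-- ===== Notes on version B (the rewrite author's own statement) =====
-- stated objective: alternative
-- what changed: Replaced the per-node explicit-stack DFS by a round-based fixed-point closure: each round relaxes the whole reachable set by one edge step in bulk and stops when it no longer grows (at most len(valid_set) rounds needed); no stack, no per-node visit order.
import Mathlib
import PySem

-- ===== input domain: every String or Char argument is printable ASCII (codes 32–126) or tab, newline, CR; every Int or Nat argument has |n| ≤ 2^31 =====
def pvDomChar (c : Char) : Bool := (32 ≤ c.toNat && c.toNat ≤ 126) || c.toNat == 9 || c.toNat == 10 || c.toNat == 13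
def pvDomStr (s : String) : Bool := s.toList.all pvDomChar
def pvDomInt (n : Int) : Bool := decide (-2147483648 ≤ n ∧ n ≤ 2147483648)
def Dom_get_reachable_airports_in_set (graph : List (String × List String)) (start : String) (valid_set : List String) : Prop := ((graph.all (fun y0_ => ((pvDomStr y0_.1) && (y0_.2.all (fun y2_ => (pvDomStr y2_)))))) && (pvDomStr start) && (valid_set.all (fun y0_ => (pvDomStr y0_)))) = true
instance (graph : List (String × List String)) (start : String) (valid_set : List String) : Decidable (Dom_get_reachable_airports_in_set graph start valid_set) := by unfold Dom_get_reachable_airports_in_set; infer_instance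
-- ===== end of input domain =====

-- B replaces the per-node stack DFS by a round-based fixed-point closure of the whole set (alternative
-- decomposition, similar cost); where A raises KeyError on a looked-up airport missing from graph,
-- B treats it as having no outgoing routes and returns. Both functions return a Python set (unordered);
-- both ports render that set in canonical sorted order, and the equivalence proved is about that set.

-- ===== PORT A =====
-- graph[airport]: inside Pre_ every airport A looks up is a graph key, so getD [] is never exercised
-- on admitted inputs (outside Pre_ the Python raises KeyError there)
def pvNbrs (graph : List (String × List String)) (a : String) : List String :=
  ((PySem.Dict.mk graph).get? a).getD []

-- termination measure helper for A's while loop: how many valid airports are not yet reached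
def pvMissingA (valid_set : List String) (reachable : PySem.Set String) : Nat :=
  (valid_set.filter (fun v => decide (v ∉ reachable))).length

lemma pvNbrs_length_le (graph : List (String × List String)) (a : String) :
    (pvNbrs graph a).length ≤ (graph.map (fun p => p.2.length)).sum := by
  induction graph with
  | nil => simp [pvNbrs, PySem.Dict.get?]
  | cons p rest ih =>
    obtain ⟨k, v⟩ := p
    simp only [pvNbrs] at ih ⊢
    simp only [List.map_cons, List.sum_cons]
    rw [PySem.Dict.get?_mk_cons]
    split
    · simp
    · exact le_trans ih (by omega)

lemma pv_filter_length_le {l : List String} {p q : String → Bool}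
    (himp : ∀ x, q x = true → p x = true) :
    (l.filter q).length ≤ (l.filter p).length := by
  induction l with
  | nil => simp
  | cons c u ihm =>
    simp only [List.filter_cons]
    by_cases hc : q c = true
    · rw [if_pos hc, if_pos (himp c hc)]; simpa using ihm
    · rw [if_neg hc]
      by_cases hp : p c = true
      · rw [if_pos hp]; exact le_trans ihm (by simp)
      · rw [if_neg hp]; exact ihm

lemma pv_filter_length_lt {l : List String} {p q : String → Bool}
    (himp : ∀ x, q x = true → p x = true) {a : String}
    (ha : a ∈ l) (hpa : p a = true) (hqa : q a = false) :
    (l.filter q).length < (l.filter p).length := by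
  induction l with
  | nil => cases ha
  | cons b t ih =>
    simp only [List.filter_cons]
    rcases List.mem_cons.mp ha with hb | hb
    · subst hb
      rw [if_pos hpa, if_neg (by simp [hqa])]
      have hmono : (t.filter q).length ≤ (t.filter p).length := pv_filter_length_le himp
      simp only [List.length_cons]; omega
    · have hrec := ih hb
      by_cases hq : q b = true
      · rw [if_pos hq, if_pos (himp b hq)]; simp only [List.length_cons]; omega
      · rw [if_neg hq]
        by_cases hp : p b = true
        · rw [if_pos hp]; simp only [List.length_cons]; omega
        · rw [if_neg hp]; omega

lemma pvMissingA_lt (valid_set : List String) (reachable : PySem.Set String) (a : String)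
    (hv : valid_set.contains a = true) (hr : reachable.contains a = false) :
    pvMissingA valid_set (reachable.add a) < pvMissingA valid_set reachable := by
  have hna : a ∉ reachable := by simpa using hr
  have hadd : reachable.add a = reachable ++ [a] := by
    simp [PySem.Set.add, PySem.Set.contains, hna]
  apply pv_filter_length_lt (a := a)
  · intro x hx
    simp only [decide_eq_true_eq] at hx ⊢
    rw [hadd] at hx
    exact fun hm => hx (List.mem_append_left _ hm)
  · exact by simpa using hv
  · simp [hna]
  · rw [hadd]; simp

-- while stack: ...  (the stack is kept head-first: list head = Python stack top)
def loopA (graph : List (String × List String)) (valid_set : List String)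
    (reachable : PySem.Set String) (stack : List String) : PySem.Set String :=
  match stack with
  | [] => reachable
  | airport :: rest =>
      if reachable.contains airport || !valid_set.contains airport then
        loopA graph valid_set reachable rest
      else
        loopA graph valid_set (reachable.add airport)
          (((pvNbrs graph airport).filter
              (fun n => !(reachable.add airport).contains n && valid_set.contains n)).reverse ++ rest)
termination_by ((graph.map (fun p => p.2.length)).sum + 1) * pvMissingA valid_set reachable + stack.length
decreasing_by
  · simp only [List.length_cons]; omega
  · rename_i h
    simp only [Bool.or_eq_true, Bool.not_eq_true', not_or] at h
    obtain ⟨hr, hv⟩ := h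
    have h1 : pvMissingA valid_set (reachable.add airport) < pvMissingA valid_set reachable :=
      pvMissingA_lt valid_set reachable airport (by simpa using hv) (by simpa using hr)
    have h2 : ((pvNbrs graph airport).filter
        (fun n => !(reachable.add airport).contains n && valid_set.contains n)).length
        ≤ (graph.map (fun p => p.2.length)).sum :=
      le_trans (List.length_filter_le _ _) (pvNbrs_length_le graph airport)
    simp only [List.length_append, List.length_reverse, List.length_cons]
    set G := (graph.map (fun p => p.2.length)).sum
    set m' := pvMissingA valid_set (reachable.add airport)
    set m := pvMissingA valid_set reachable
    set k := ((pvNbrs graph airport).filter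
        (fun n => !(reachable.add airport).contains n && valid_set.contains n)).length
    calc (G + 1) * m' + (k + rest.length)
        ≤ (G + 1) * m' + (G + rest.length) := by omega
      _ < (G + 1) * (m' + 1) + rest.length + 1 := by ring_nf; omega
      _ ≤ (G + 1) * m + rest.length + 1 := by
          have hm : m' + 1 ≤ m := h1
          have := Nat.mul_le_mul_left (G + 1) hm
          omega

def get_reachable_airports_in_set (graph : List (String × List String)) (start : String)
    (valid_set : List String) : List String :=
  -- the Python function returns a set (unordered); canonical sorted order, same in both ports
  PySem.List.sorted (loopA graph valid_set PySem.Set.empty [start]) (fun x => x)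

-- ===== PORT B =====
-- one closure round: reachable | {n for a in reachable for n in graph.get(a, ()) if n in valid_set}
def stepB (graph : List (String × List String)) (valid_set : List String)
    (reachable : PySem.Set String) : PySem.Set String :=
  reachable.union (PySem.Set.ofList
    (List.flatMap (fun a => (pvNbrs graph a).filter (fun n => valid_set.contains n)) reachable))

-- for _ in range(n): nxt = one round; if nxt == reachable: break; reachable = nxt
def loopB (graph : List (String × List String)) (valid_set : List String) :
    Nat → PySem.Set String → PySem.Set String
  | 0, reachable => reachable
  | n + 1, reachable =>
      let nxt := stepB graph valid_set reachable
      if nxt.equal reachable then reachable else loopB graph valid_set n nxt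

def get_reachable_airports_in_set_alt (graph : List (String × List String)) (start : String)
    (valid_set : List String) : List String :=
  PySem.List.sorted
    (loopB graph valid_set valid_set.length
      (if valid_set.contains start then PySem.Set.ofList [start] else PySem.Set.empty))
    (fun x => x)

-- ===== PRECONDITION & SPEC =====
-- helpers for Pre_ only (independent of both ports): the set of airports the Python A actually
-- indexes graph with — valid airports reachable from start through valid airports that have graph
-- entries (one saturation round per valid airport is always enough for the fixpoint)
def pvAdjPre (graph : List (String × List String)) (a : String) : List String :=
  ((graph.find? (fun p => p.1 == a)).map Prod.snd).getD []
def pvReachStep (graph : List (String × List String)) (valid : List String)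
    (s : List String) : List String :=
  (s ++ (s.filter (fun a => (graph.map Prod.fst).contains a)).flatMap
      (fun a => (pvAdjPre graph a).filter (fun n => valid.contains n))).dedup
def pvReach (graph : List (String × List String)) (start : String)
    (valid : List String) : List String :=
  (pvReachStep graph valid)^[valid.length] (if valid.contains start then [start] else [])

-- Pre_ excludes exactly the inputs on which the Python A raises KeyError: some airport A looks up
-- (a valid airport reachable from start through keyed valid airports) has no entry in graph.
def Pre_get_reachable_airports_in_set (graph : List (String × List String)) (start : String)
    (valid_set : List String) : Prop :=
  ∀ x ∈ pvReach graph start valid_set, x ∈ graph.map Prod.fst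
instance (graph : List (String × List String)) (start : String) (valid_set : List String) :
    Decidable (Pre_get_reachable_airports_in_set graph start valid_set) := by
  unfold Pre_get_reachable_airports_in_set; infer_instance

def pvWitness_get_reachable_airports_in_set : (List (String × List String)) × String × List String :=
  ([("a", ["b"]), ("b", [])], "a", ["a", "b"])

def Spec_get_reachable_airports_in_set (graph : List (String × List String)) (start : String) (valid_set : List String) (out : List String) : Prop := out = get_reachable_airports_in_set_alt graph start valid_set
instance (graph : List (String × List String)) (start : String) (valid_set : List String) (out : List String) : Decidable (Spec_get_reachable_airports_in_set graph start valid_set out) := by unfold Spec_get_reachable_airports_in_set; infer_instance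

-- ===== CLAIM (what is proved, stated in full; the proofs are below) =====
def Claim_equal_get_reachable_airports_in_set : Prop := ∀ (graph : List (String × List String)) (start : String) (valid_set : List String), Dom_get_reachable_airports_in_set graph start valid_set → Pre_get_reachable_airports_in_set graph start valid_set → Spec_get_reachable_airports_in_set graph start valid_set (get_reachable_airports_in_set graph start valid_set)

-- ===== LEMMAS AND PROOFS =====

-- the edge relation both programs explore: one hop through graph staying inside valid_set
def pvE (graph : List (String × List String)) (valid_set : List String) (x y : String) : Prop :=
  x ∈ valid_set ∧ y ∈ valid_set ∧ y ∈ pvNbrs graph x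

-- the common specification set: valid airports reachable from start through valid airports
def pvS (graph : List (String × List String)) (valid_set : List String) (start x : String) : Prop :=
  x ∈ valid_set ∧ Relation.ReflTransGen (pvE graph valid_set) start x

lemma pv_length_lt {s t : List String} (hs : s.Nodup) (ht : t.Nodup)
    (hsub : ∀ x ∈ s, x ∈ t) {y : String} (hy : y ∈ t) (hyn : y ∉ s) :
    s.length < t.length := by
  have h1 : s.toFinset ⊂ t.toFinset := by
    constructor
    · intro z hz; simp at hz ⊢; exact hsub z hz
    · intro hc; exact hyn (by simpa using hc (by simpa using hy))
  have := Finset.card_lt_card h1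
  rwa [List.toFinset_card_of_nodup hs, List.toFinset_card_of_nodup ht] at this

lemma loopA_spec (graph : List (String × List String)) (valid_set : List String) (start : String) :
    ∀ (reachable : PySem.Set String) (stack : List String),
    reachable.Nodup →
    (∀ r ∈ reachable, pvS graph valid_set start r) →
    (∀ s ∈ stack, s ∈ valid_set → pvS graph valid_set start s) →
    (∀ r ∈ reachable, ∀ n ∈ pvNbrs graph r, n ∈ valid_set → n ∈ reachable ∨ n ∈ stack) →
    (start ∈ valid_set → start ∈ reachable ∨ start ∈ stack) →
    (loopA graph valid_set reachable stack).Nodup ∧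
    (∀ x, x ∈ loopA graph valid_set reachable stack ↔ pvS graph valid_set start x) := by
  intro reachable stack
  induction reachable, stack using loopA.induct graph valid_set with
  | case1 reachable =>
    intro hnd h2 h3 h4 h5
    rw [loopA]
    have key : ∀ y, Relation.ReflTransGen (pvE graph valid_set) start y → y ∈ valid_set →
        y ∈ reachable := by
      intro y hy
      induction hy with
      | refl => intro hv; exact (h5 hv).resolve_right (by simp)
      | tail hab hbc ih =>
        intro hcv
        obtain ⟨hbv, _, hmem⟩ := hbc
        exact (h4 _ (ih hbv) _ hmem hcv).resolve_right (by simp)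
    exact ⟨hnd, fun x => ⟨h2 x, fun hS => key x hS.2 hS.1⟩⟩
  | case2 reachable airport rest hcond ih =>
    intro hnd h2 h3 h4 h5
    rw [loopA, if_pos hcond]
    have hcond' : airport ∈ reachable ∨ airport ∉ valid_set := by
      by_cases hm : airport ∈ reachable
      · exact Or.inl hm
      · refine Or.inr (fun hv => ?_)
        have e1 : reachable.contains airport = false := by simpa using hm
        have e2 : valid_set.contains airport = true := by simpa using hv
        rw [e1, e2] at hcond
        simp at hcond
    apply ih hnd h2 (fun s hs hv => h3 s (List.mem_cons_of_mem _ hs) hv)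
    · intro r hr n hn hnv
      rcases h4 r hr n hn hnv with h | h
      · exact Or.inl h
      · rcases List.mem_cons.mp h with h | h
        · subst h
          rcases hcond' with hc | hc
          · exact Or.inl hc
          · exact absurd hnv hc
        · exact Or.inr h
    · intro hsv
      rcases h5 hsv with h | h
      · exact Or.inl h
      · rcases List.mem_cons.mp h with h | h
        · subst h
          rcases hcond' with hc | hc
          · exact Or.inl hc
          · exact absurd hsv hc
        · exact Or.inr h
  | case3 reachable airport rest hcond ih =>
    intro hnd h2 h3 h4 h5
    rw [loopA, if_neg hcond]
    have hna : airport ∉ reachable := by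
      intro hm
      have e1 : reachable.contains airport = true := by simpa using hm
      rw [e1] at hcond
      simp at hcond
    have hav : airport ∈ valid_set := by
      by_contra hm
      have e2 : valid_set.contains airport = false := by simpa using hm
      rw [e2] at hcond
      simp at hcond
    have hSa : pvS graph valid_set start airport := h3 airport List.mem_cons_self hav
    have hadd : ∀ y, y ∈ reachable.add airport ↔ y ∈ reachable ∨ y = airport :=
      fun y => PySem.Set.mem_add _ _ _
    apply ih (PySem.Set.nodup_add _ _ hnd)
    · intro r hr
      rcases (hadd r).mp hr with h | h
      · exact h2 r h
      · subst h; exact hSa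
    · intro s hs hsv
      rcases List.mem_append.mp hs with h | h
      · rw [List.mem_reverse] at h
        obtain ⟨hsn, _⟩ := List.mem_filter.mp h
        exact ⟨hsv, hSa.2.tail ⟨hav, hsv, hsn⟩⟩
      · exact h3 s (List.mem_cons_of_mem _ h) hsv
    · intro r hr n hn hnv
      rcases (hadd r).mp hr with hrold | hreq
      · rcases h4 r hrold n hn hnv with h | h
        · exact Or.inl ((hadd n).mpr (Or.inl h))
        · rcases List.mem_cons.mp h with h | h
          · exact Or.inl ((hadd n).mpr (Or.inr h))
          · exact Or.inr (List.mem_append_right _ h)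
      · rw [hreq] at hn
        by_cases hc : n ∈ reachable.add airport
        · exact Or.inl hc
        · refine Or.inr (List.mem_append_left _ ?_)
          rw [List.mem_reverse]
          refine List.mem_filter.mpr ⟨hn, ?_⟩
          have hc1 : n ∉ reachable := fun hmm => hc ((hadd n).mpr (Or.inl hmm))
          have hc2 : n ≠ airport := fun hmm => hc ((hadd n).mpr (Or.inr hmm))
          simp [hnv, hc1, hc2]
    · intro hsv
      rcases h5 hsv with h | h
      · exact Or.inl ((hadd start).mpr (Or.inl h))
      · rcases List.mem_cons.mp h with h | h
        · exact Or.inl ((hadd start).mpr (Or.inr h))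
        · exact Or.inr (List.mem_append_right _ h)

lemma mem_stepB (graph : List (String × List String)) (valid_set : List String)
    (r : PySem.Set String) (x : String) :
    x ∈ stepB graph valid_set r ↔
      x ∈ r ∨ ∃ a ∈ r, x ∈ pvNbrs graph a ∧ x ∈ valid_set := by
  unfold stepB
  constructor
  · intro h
    rcases (PySem.Set.mem_union _ _ _).mp h with h | h
    · exact Or.inl h
    · have h' := (PySem.Set.mem_ofList _ _).mp h
      rw [List.mem_flatMap] at h'
      obtain ⟨a, ha, hx⟩ := h'
      rw [List.mem_filter] at hx
      exact Or.inr ⟨a, ha, hx.1, by simpa using hx.2⟩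
  · intro h
    apply (PySem.Set.mem_union _ _ _).mpr
    rcases h with h | ⟨a, ha, hx, hv⟩
    · exact Or.inl h
    · refine Or.inr ((PySem.Set.mem_ofList _ _).mpr ?_)
      rw [List.mem_flatMap]
      exact ⟨a, ha, List.mem_filter.mpr ⟨hx, by simpa using hv⟩⟩

lemma nodup_stepB (graph : List (String × List String)) (valid_set : List String)
    (r : PySem.Set String) (h : r.Nodup) : (stepB graph valid_set r).Nodup := by
  unfold stepB
  exact PySem.Set.nodup_union _ _ h

lemma loopB_sound (graph : List (String × List String)) (valid_set : List String) (start : String) :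
    ∀ (n : Nat) (r : PySem.Set String), (∀ x ∈ r, pvS graph valid_set start x) →
    ∀ x ∈ loopB graph valid_set n r, pvS graph valid_set start x := by
  intro n
  induction n with
  | zero => intro r h x hx; exact h x hx
  | succ n ih =>
    intro r h x hx
    simp only [loopB] at hx
    split at hx
    · exact h x hx
    · refine ih _ ?_ x hx
      intro y hy
      rcases (mem_stepB graph valid_set r y).mp hy with h' | ⟨a, ha, hyn, hyv⟩
      · exact h y h'
      · obtain ⟨hav, hrtg⟩ := h a ha
        exact ⟨hyv, hrtg.tail ⟨hav, hyv, hyn⟩⟩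

lemma loopB_nodup (graph : List (String × List String)) (valid_set : List String) :
    ∀ (n : Nat) (r : PySem.Set String), r.Nodup → (loopB graph valid_set n r).Nodup := by
  intro n
  induction n with
  | zero => intro r h; exact h
  | succ n ih =>
    intro r h
    simp only [loopB]
    split
    · exact h
    · exact ih _ (nodup_stepB _ _ _ h)

lemma loopB_complete (graph : List (String × List String)) (valid_set : List String) (start : String) :
    ∀ (n : Nat) (r : PySem.Set String), r.Nodup → (∀ x ∈ r, x ∈ valid_set) → start ∈ r →
    valid_set.toFinset.card ≤ n + r.length →
    ∀ x, pvS graph valid_set start x → x ∈ loopB graph valid_set n r := by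
  intro n
  induction n with
  | zero =>
    intro r hnd hsub hstart hcard x hx
    simp only [loopB]
    have h1 : r.toFinset ⊆ valid_set.toFinset := by
      intro y hy; rw [List.mem_toFinset] at hy ⊢; exact hsub y hy
    have h2 : r.toFinset = valid_set.toFinset := by
      apply Finset.eq_of_subset_of_card_le h1
      rw [List.toFinset_card_of_nodup hnd]; omega
    have hxv := hx.1
    rw [← List.mem_toFinset, ← h2, List.mem_toFinset] at hxv
    exact hxv
  | succ n ih =>
    intro r hnd hsub hstart hcard x hx
    simp only [loopB]
    split
    · rename_i heq
      have hcl : ∀ y, y ∈ stepB graph valid_set r ↔ y ∈ r := (PySem.Set.equal_iff _ _).mp heq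
      have key : ∀ y, Relation.ReflTransGen (pvE graph valid_set) start y → y ∈ r := by
        intro y hy
        induction hy with
        | refl => exact hstart
        | tail hab hbc ih2 =>
          exact (hcl _).mp ((mem_stepB _ _ _ _).mpr (Or.inr ⟨_, ih2, hbc.2.2, hbc.2.1⟩))
      exact key x hx.2
    · rename_i hne
      have hsub2 : ∀ y ∈ r, y ∈ stepB graph valid_set r :=
        fun y hy => (mem_stepB _ _ _ _).mpr (Or.inl hy)
      have hex : ∃ y, y ∈ stepB graph valid_set r ∧ y ∉ r := by
        by_contra hno
        refine hne ((PySem.Set.equal_iff _ _).mpr (fun y => ⟨fun hy => ?_, hsub2 y⟩))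
        by_contra hny
        exact hno ⟨y, hy, hny⟩
      obtain ⟨y, hy1, hy2⟩ := hex
      have hlt : r.length < (stepB graph valid_set r).length :=
        pv_length_lt hnd (nodup_stepB _ _ _ hnd) hsub2 hy1 hy2
      apply ih (stepB graph valid_set r) (nodup_stepB _ _ _ hnd)
      · intro z hz
        rcases (mem_stepB _ _ _ _).mp hz with h' | ⟨_, _, _, hv⟩
        · exact hsub z h'
        · exact hv
      · exact hsub2 start hstart
      · omega
      · exact hx

-- ===== VERDICT (by name: the statement is the Claim_ definition above) =====
theorem get_reachable_airports_in_set_spec : Claim_equal_get_reachable_airports_in_set := by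
  intro graph start valid_set _ _
  unfold Spec_get_reachable_airports_in_set get_reachable_airports_in_set
    get_reachable_airports_in_set_alt
  have hA := loopA_spec graph valid_set start PySem.Set.empty [start]
    (by simp [PySem.Set.empty])
    (by intro r hr; simp [PySem.Set.empty] at hr)
    (by intro s hs hv
        have hs' : s = start := by simpa using hs
        subst hs'; exact ⟨hv, Relation.ReflTransGen.refl⟩)
    (by intro r hr; simp [PySem.Set.empty] at hr)
    (by intro _; exact Or.inr (by simp))
  obtain ⟨hAnd, hAmem⟩ := hA
  by_cases hs0 : start ∈ valid_set
  · have hc : valid_set.contains start = true := by simpa using hs0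
    rw [if_pos hc]
    have hr0sound : ∀ y ∈ (PySem.Set.ofList [start] : PySem.Set String),
        pvS graph valid_set start y := by
      intro y hy
      have hy' : y = start := by simpa using (PySem.Set.mem_ofList _ _).mp hy
      subst hy'; exact ⟨hs0, Relation.ReflTransGen.refl⟩
    have hBnd : (loopB graph valid_set valid_set.length (PySem.Set.ofList [start])).Nodup :=
      loopB_nodup _ _ _ _ (PySem.Set.nodup_ofList _)
    have hBmem : ∀ x, x ∈ loopB graph valid_set valid_set.length (PySem.Set.ofList [start]) ↔
        pvS graph valid_set start x := by
      intro x
      constructor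
      · exact loopB_sound _ _ _ _ _ hr0sound x
      · intro hx
        apply loopB_complete graph valid_set start _ _ (PySem.Set.nodup_ofList _) ?_ ?_ ?_ x hx
        · intro y hy
          have hy' : y = start := by simpa using (PySem.Set.mem_ofList _ _).mp hy
          subst hy'; exact hs0
        · exact (PySem.Set.mem_ofList _ _).mpr (by simp)
        · have h1 := List.toFinset_card_le valid_set
          have h2 : (PySem.Set.ofList [start] : List String).length = 1 := rfl
          omega
    apply PySem.List.sorted_eq_sorted_of_perm _ _ _ (fun a b h => h)
    exact (List.perm_ext_iff_of_nodup hAnd hBnd).mpr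
      (fun a => (hAmem a).trans ((hBmem a).symm))
  · rw [if_neg (by simpa using hs0)]
    have hBnd : (loopB graph valid_set valid_set.length PySem.Set.empty).Nodup :=
      loopB_nodup _ _ _ _ (by simp [PySem.Set.empty])
    have hBmem : ∀ x, x ∈ loopB graph valid_set valid_set.length PySem.Set.empty ↔
        pvS graph valid_set start x := by
      intro x
      constructor
      · exact loopB_sound _ _ _ _ _ (by intro y hy; simp [PySem.Set.empty] at hy) x
      · rintro ⟨hxv, hrtg⟩
        exfalso
        rcases Relation.ReflTransGen.cases_head hrtg with h | ⟨b, hb, _⟩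
        · exact hs0 (h ▸ hxv)
        · exact hs0 hb.1
    apply PySem.List.sorted_eq_sorted_of_perm _ _ _ (fun a b h => h)
    exact (List.perm_ext_iff_of_nodup hAnd hBnd).mpr
      (fun a => (hAmem a).trans ((hBmem a).symm))
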